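-- pv_equiv track=rewrite | github.com/772vjrvj/pythoncrawling | kmong/ko/논문pdf/main최종1.py | should_skip_line_with_number_pattern
-- ===== SOURCE A (Python) =====
-- def should_skip_line_with_number_pattern(line):
--     # ':' 기준으로 나눈 각 부분을 확인
--     parts = line.split(':')
--     for part in parts:
--         cleaned_part = part.replace(" ", "")  # 모든 공백 제거
--
--         # '-' 또는 '–'를 기준으로 나눠서 숫자 4개 - 숫자 4개 패턴을 찾음
--         if '-' in cleaned_part or '–' in cleaned_part:  # 일반 대시('-') 또는 긴 대시('–')를 모두 처리
--             left_right = cleaned_part.split('-') if '-' in cleaned_part else cleaned_part.split('–')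
--             if len(left_right) == 2:
--                 left, right = left_right
--
--                 # 숫자 3개 - 숫자 3개 패턴을 찾음
--                 if left.isdigit() and right.isdigit() and len(left) == 3 and len(right) == 3:
--                     return True
--     return False
-- ===== SOURCE B (Python) =====
-- def should_skip_line_with_number_pattern(line):
--     def _is_num_pair(part):
--         c = part.replace(" ", "")
--         return len(c) == 7 and c[3] in "-\u2013" and c[:3].isdigit() and c[4:].isdigit()
--     return any(_is_num_pair(part) for part in line.split(':'))
-- ===== Notes on version B (the rewrite author's own statement) =====
-- stated objective: simpler
-- what changed: Replaces the dash-split/destructure/branch logic per part with a single fixed-layout positional test (len==7, dash at index 3, digit prefix/suffix) and folds the outer early-return loop into any().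
import Mathlib
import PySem

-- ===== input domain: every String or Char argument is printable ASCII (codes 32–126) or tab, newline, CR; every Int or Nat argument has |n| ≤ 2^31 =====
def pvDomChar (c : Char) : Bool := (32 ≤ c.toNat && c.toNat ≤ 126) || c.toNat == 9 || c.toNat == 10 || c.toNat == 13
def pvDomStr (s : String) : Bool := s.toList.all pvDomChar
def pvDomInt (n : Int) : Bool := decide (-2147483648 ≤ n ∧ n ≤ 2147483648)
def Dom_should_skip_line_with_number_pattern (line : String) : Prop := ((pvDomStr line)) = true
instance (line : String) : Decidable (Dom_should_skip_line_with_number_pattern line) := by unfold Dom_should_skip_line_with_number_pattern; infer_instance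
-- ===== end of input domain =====

-- B replaces A's per-part dash-split/branch logic with a fixed-layout positional test and an any(); objective: simpler.

-- ===== PORT A =====
-- per-part body of A's for-loop: cleaned = part.replace(" ",""); dash branch; split; 3-digit/3-digit test
def pvCheckA (part : List Char) : Bool :=
  let cleaned := PySem.Chars.replace part [' '] []
  if PySem.Chars.isIn ['-'] cleaned || PySem.Chars.isIn ['–'] cleaned then
    let left_right := if PySem.Chars.isIn ['-'] cleaned
      then PySem.Chars.splitOn cleaned ['-'] else PySem.Chars.splitOn cleaned ['–']
    match left_right with
    | [left, right] =>
        PySem.Chars.strIsdigit left && PySem.Chars.strIsdigit right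
          && left.length == 3 && right.length == 3
    | _ => false
  else false

-- A's for-loop with early 'return True', 'return False' after
def pvLoopA : List (List Char) → Bool
  | [] => false
  | p :: ps => if pvCheckA p then true else pvLoopA ps

def should_skip_line_with_number_pattern (line : String) : Bool :=
  pvLoopA (PySem.Chars.splitOn line.toList [':'])

-- ===== PORT B =====
-- B's _is_num_pair: len(c)==7 and c[3] in "-–" and c[:3].isdigit() and c[4:].isdigit()
def pvCheckB (part : List Char) : Bool :=
  let c := PySem.Chars.replace part [' '] []
  c.length == 7
    && (match PySem.List.pyGet? c 3 with
        | some ch => ch == '-' || ch == '–'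
        | none => false)
    && PySem.Chars.strIsdigit (PySem.List.slice c none (some 3))
    && PySem.Chars.strIsdigit (PySem.List.slice c (some 4) none)

def should_skip_line_with_number_pattern_alt (line : String) : Bool :=
  (PySem.Chars.splitOn line.toList [':']).any pvCheckB

-- ===== PRECONDITION & SPEC =====
def Spec_should_skip_line_with_number_pattern (line : String) (out : Bool) : Prop := out = should_skip_line_with_number_pattern_alt line
instance (line : String) (out : Bool) : Decidable (Spec_should_skip_line_with_number_pattern line out) := by unfold Spec_should_skip_line_with_number_pattern; infer_instance

-- ===== CLAIM (what is proved, stated in full; the proofs are below) =====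
def Claim_equal_should_skip_line_with_number_pattern : Prop := ∀ (line : String), Dom_should_skip_line_with_number_pattern line → Spec_should_skip_line_with_number_pattern line (should_skip_line_with_number_pattern line)

-- ===== LEMMAS AND PROOFS =====

-- reference single-char splitter: what splitOn computes for a one-char separator
def pvSplit1 (d : Char) : List Char → List Char → List (List Char)
  | [], cur => [cur.reverse]
  | c :: rest, cur => if c = d then cur.reverse :: pvSplit1 d rest [] else pvSplit1 d rest (c :: cur)

theorem pvGo_single (d : Char) : ∀ (fuel : Nat) (cs cur : List Char) (acc : List (List Char)),
    cs.length < fuel →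
    PySem.Chars.splitOn.go [d] fuel cs cur acc = acc.reverse ++ pvSplit1 d cs cur := by
  intro fuel
  induction fuel with
  | zero => intro cs cur acc h; omega
  | succ n ih =>
    intro cs cur acc h
    cases cs with
    | nil => simp [PySem.Chars.splitOn.go, pvSplit1]
    | cons c rest =>
      rw [PySem.Chars.splitOn.go.eq_def]
      by_cases hc : c = d
      · have hp : List.isPrefixOf [d] (c :: rest) = true := by
          simp [List.isPrefixOf, hc]
        simp only [hp, if_true, List.length_cons, List.length_nil, List.drop_succ_cons,
          List.drop_zero]
        rw [ih rest [] (cur.reverse :: acc) (by simpa using Nat.lt_of_succ_lt_succ h)]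
        simp [pvSplit1, hc]
      · have hp : List.isPrefixOf [d] (c :: rest) = false := by
          simp [List.isPrefixOf]
          intro h'; exact absurd h'.symm hc
        simp only [hp, Bool.false_eq_true, if_false]
        rw [ih rest (c :: cur) acc (by simpa using Nat.lt_of_succ_lt_succ h)]
        simp [pvSplit1, hc]

theorem pvSplitOn_single (d : Char) (cs : List Char) :
    PySem.Chars.splitOn cs [d] = pvSplit1 d cs [] := by
  rw [PySem.Chars.splitOn, pvGo_single d (cs.length + 1) cs [] [] (by omega)]
  simp

theorem pvSplit1_ne_nil (d : Char) (cs cur : List Char) : pvSplit1 d cs cur ≠ [] := by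
  induction cs generalizing cur with
  | nil => simp [pvSplit1]
  | cons c rest ih =>
    by_cases hc : c = d <;> simp [pvSplit1, hc] <;> apply ih

theorem pvSplit1_no_sep (d : Char) (cs cur : List Char) (h : d ∉ cs) :
    pvSplit1 d cs cur = [cur.reverse ++ cs] := by
  induction cs generalizing cur with
  | nil => simp [pvSplit1]
  | cons c rest ih =>
    have hc : c ≠ d := fun he => h (by simp [he])
    rw [pvSplit1, if_neg hc, ih (c :: cur) (fun hm => h (List.mem_cons_of_mem _ hm))]
    simp

theorem pvSplit1_first (d : Char) (l r cur : List Char) (h : d ∉ l) :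
    pvSplit1 d (l ++ d :: r) cur = (cur.reverse ++ l) :: pvSplit1 d r [] := by
  induction l generalizing cur with
  | nil => simp [pvSplit1]
  | cons c rest ih =>
    have hc : c ≠ d := fun he => h (by simp [he])
    rw [List.cons_append, pvSplit1, if_neg hc,
      ih (c :: cur) (fun hm => h (List.mem_cons_of_mem _ hm))]
    simp

theorem pvSplit1_singleton (d : Char) (cs cur x : List Char)
    (h : pvSplit1 d cs cur = [x]) : x = cur.reverse ++ cs ∧ d ∉ cs := by
  induction cs generalizing cur with
  | nil => simp_all [pvSplit1]
  | cons c rest ih =>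
    by_cases hc : c = d
    · rw [pvSplit1, if_pos hc] at h
      have := congrArg List.length h
      simp at this
      exact absurd this (pvSplit1_ne_nil d rest [])
    · rw [pvSplit1, if_neg hc] at h
      obtain ⟨hx, hm⟩ := ih (c :: cur) h
      refine ⟨by simpa using hx, ?_⟩
      simp [hm]
      intro he; exact hc he.symm

-- first-occurrence decomposition
theorem pvFirstOcc {d : Char} {cs : List Char} (h : d ∈ cs) :
    ∃ l r, cs = l ++ d :: r ∧ d ∉ l := by
  induction cs with
  | nil => cases h
  | cons c rest ih =>
    by_cases hc : c = d
    · exact ⟨[], rest, by simp [hc], by simp⟩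
    · obtain ⟨l, r, he, hn⟩ := ih (by cases h with
        | head => exact absurd rfl hc
        | tail _ hm => exact hm)
      exact ⟨c :: l, r, by simp [he], by simp [hn]; intro h'; exact hc h'.symm⟩

theorem pvIsIn_singleton (d : Char) (cs : List Char) :
    PySem.Chars.isIn [d] cs = true ↔ d ∈ cs := by
  rw [PySem.Chars.isIn_iff_infix]
  constructor
  · intro h; exact h.mem (by simp)
  · intro h
    obtain ⟨l, r, he, _⟩ := pvFirstOcc h
    exact ⟨l, r, by simp [he]⟩

-- digits are not dashes
theorem pvDigit_ne_dash {x : Char} (h : PySem.Chars.isdigit x = true) : x ≠ '-' ∧ x ≠ '–' := by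
  constructor <;> intro he <;> subst he <;> simp_all [PySem.Chars.isdigit]

theorem pvStrIsdigit_of (x : List Char) (hx : x ≠ [])
    (hxd : ∀ y ∈ x, PySem.Chars.isdigit y = true) : PySem.Chars.strIsdigit x = true := by
  cases x with
  | nil => exact absurd rfl hx
  | cons a t =>
    simp [PySem.Chars.strIsdigit, List.all_eq_true]
    exact ⟨hxd a (by simp), fun y hy => hxd y (by simp [hy])⟩

-- the common pattern both per-part tests detect
def pvPat (c : List Char) : Prop :=
  ∃ l ch r, c = l ++ ch :: r ∧ l.length = 3 ∧ r.length = 3 ∧ (ch = '-' ∨ ch = '–')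
    ∧ (∀ x ∈ l, PySem.Chars.isdigit x = true) ∧ (∀ x ∈ r, PySem.Chars.isdigit x = true)

theorem pvCheckB_iff (part : List Char) :
    pvCheckB part = true ↔ pvPat (PySem.Chars.replace part [' '] []) := by
  rw [pvCheckB]
  set w := PySem.Chars.replace part [' '] [] with hc
  clear_value w
  constructor
  · intro h
    simp only [Bool.and_eq_true, beq_iff_eq] at h
    obtain ⟨⟨⟨hlen, hget⟩, htake⟩, hdrop⟩ := h
    have h3 : (3 : Nat) < w.length := by omega
    rw [show ((3 : Int)) = ((3 : Nat) : Int) from rfl, PySem.List.pyGet?_natCast,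
      List.getElem?_eq_getElem h3] at hget
    simp only [Bool.or_eq_true, beq_iff_eq] at hget
    refine ⟨w.take 3, (w[3]'h3), w.drop 4, ?_, by simp [hlen], by simp [hlen], ?_, ?_, ?_⟩
    · conv_lhs => rw [← List.take_append_drop 3 w]
      congr 1
      rw [List.drop_eq_getElem_cons h3]
    · rcases hget with h | h
      · exact Or.inl (by simpa using h)
      · exact Or.inr (by simpa using h)
    · rw [show ((3 : Int)) = ((3 : Nat) : Int) from rfl,
        PySem.List.slice_to_natCast] at htake
      simp [PySem.Chars.strIsdigit, List.all_eq_true] at htake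
      exact htake.2
    · rw [show ((4 : Int)) = ((4 : Nat) : Int) from rfl,
        PySem.List.slice_from_natCast] at hdrop
      simp [PySem.Chars.strIsdigit, List.all_eq_true] at hdrop
      exact hdrop.2
  · rintro ⟨l, ch, r, he, hl, hr, hdash, hld, hrd⟩
    subst he
    have hlen : (l ++ ch :: r).length = 7 := by simp [hl, hr]
    have hget : PySem.List.pyGet? (l ++ ch :: r) 3 = some ch := by
      have := PySem.List.pyGet?_append_length (pre := l) (y := ch) (ys := r)
      rwa [hl] at this
    have htake : PySem.List.slice (l ++ ch :: r) none (some ((3 : Nat) : Int)) = l := by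
      rw [PySem.List.slice_to_natCast, ← hl, List.take_left]
    have hdrop : PySem.List.slice (l ++ ch :: r) (some ((4 : Nat) : Int)) none = r := by
      rw [PySem.List.slice_from_natCast,
        show l ++ ch :: r = (l ++ [ch]) ++ r by simp,
        List.drop_left' (by simp [hl])]
    simp only [Bool.and_eq_true, beq_iff_eq]
    refine ⟨⟨⟨by simpa using hlen, ?_⟩, ?_⟩, ?_⟩
    · rw [show ((3 : Int)) = ((3 : Nat) : Int) from rfl] at hget
      rw [show ((3 : Int)) = ((3 : Nat) : Int) from rfl, hget]
      rcases hdash with h | h <;> simp [h]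
    · rw [show ((3 : Int)) = ((3 : Nat) : Int) from rfl, htake]
      exact pvStrIsdigit_of l (by intro h0; rw [h0] at hl; simp at hl) hld
    · rw [show ((4 : Int)) = ((4 : Nat) : Int) from rfl, hdrop]
      exact pvStrIsdigit_of r (by intro h0; rw [h0] at hr; simp at hr) hrd

theorem pvCheckA_iff (part : List Char) :
    pvCheckA part = true ↔ pvPat (PySem.Chars.replace part [' '] []) := by
  rw [pvCheckA]
  set c := PySem.Chars.replace part [' '] [] with hc
  clear_value c
  constructor
  · intro h
    by_cases hin : PySem.Chars.isIn ['-'] c = true ∨ PySem.Chars.isIn ['–'] c = true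
    case neg =>
      rw [if_neg (by intro hor; exact hin (by simpa using Bool.or_eq_true _ _ ▸ hor))] at h
      exact absurd h (by simp)
    case pos =>
    -- the separator A splits on
    have hd : ∃ d, (d = '-' ∨ d = '–') ∧ d ∈ c ∧
        (if PySem.Chars.isIn ['-'] c then PySem.Chars.splitOn c ['-']
         else PySem.Chars.splitOn c ['–']) = PySem.Chars.splitOn c [d] := by
      by_cases hm : PySem.Chars.isIn ['-'] c = true
      · exact ⟨'-', Or.inl rfl, (pvIsIn_singleton _ _).mp hm, by rw [if_pos hm]⟩
      · rcases hin with h' | h'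
        · exact absurd h' hm
        · exact ⟨'–', Or.inr rfl, (pvIsIn_singleton _ _).mp h', by rw [if_neg (by simp [hm])]⟩
    obtain ⟨d, hdd, hdc, hsel⟩ := hd
    rw [if_pos (by rcases hin with h' | h' <;> simp [h']), hsel] at h
    obtain ⟨l0, r0, he, hnl⟩ := pvFirstOcc hdc
    rw [he, pvSplitOn_single, pvSplit1_first d l0 r0 [] hnl, List.reverse_nil,
      List.nil_append] at h
    rcases h2 : pvSplit1 d r0 [] with _ | ⟨r, rest⟩
    · exact absurd h2 (pvSplit1_ne_nil d r0 [])
    cases rest with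
    | cons _ _ => rw [h2] at h; exact absurd h (by simp)
    | nil =>
      obtain ⟨hrr, hnr⟩ := pvSplit1_singleton d r0 [] r h2
      have hrr' : r = r0 := by simpa using hrr
      subst hrr'
      rw [h2] at h
      simp only [Bool.and_eq_true, beq_iff_eq] at h
      obtain ⟨⟨⟨hl0, hr0⟩, hll⟩, hrl⟩ := h
      refine ⟨l0, d, r, he, hll, hrl, hdd, ?_, ?_⟩
      · simp [PySem.Chars.strIsdigit, List.all_eq_true] at hl0; exact hl0.2
      · simp [PySem.Chars.strIsdigit, List.all_eq_true] at hr0; exact hr0.2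
  · rintro ⟨l, d, r, he, hl, hr, hdash, hld, hrd⟩
    subst he
    have hnl : d ∉ l := fun hm => by
      rcases hdash with h | h <;> subst h
      · exact (pvDigit_ne_dash (hld _ hm)).1 rfl
      · exact (pvDigit_ne_dash (hld _ hm)).2 rfl
    have hnr : d ∉ r := fun hm => by
      rcases hdash with h | h <;> subst h
      · exact (pvDigit_ne_dash (hrd _ hm)).1 rfl
      · exact (pvDigit_ne_dash (hrd _ hm)).2 rfl
    have hsplit : PySem.Chars.splitOn (l ++ d :: r) [d] = [l, r] := by
      rw [pvSplitOn_single, pvSplit1_first d l r [] hnl, pvSplit1_no_sep d r [] hnr]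
      simp
    have hdig : ∀ (x : List Char), x.length = 3 → (∀ y ∈ x, PySem.Chars.isdigit y = true) →
        PySem.Chars.strIsdigit x = true := by
      intro x hx hxd
      exact pvStrIsdigit_of x (by intro h0; rw [h0] at hx; simp at hx) hxd
    by_cases hm : PySem.Chars.isIn ['-'] (l ++ d :: r) = true
    · -- A splits on '-'; then d must be '-' itself
      have hdm : '-' ∈ l ++ d :: r := (pvIsIn_singleton _ _).mp hm
      have hd' : d = '-' := by
        rcases List.mem_append.mp hdm with h' | h'
        · exact absurd ((pvDigit_ne_dash (hld _ h')).1 rfl) (by simp)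
        · rcases List.mem_cons.mp h' with h'' | h''
          · exact h''.symm
          · exact absurd ((pvDigit_ne_dash (hrd _ h'')).1 rfl) (by simp)
      subst hd'
      rw [if_pos (by simp [hm]), if_pos hm, hsplit]
      simp [hdig l hl hld, hdig r hr hrd, hl, hr]
    · have hd' : d = '–' := by
        rcases hdash with h | h
        · subst h
          exact absurd ((pvIsIn_singleton '-' _).mpr (by simp)) hm
        · exact h
      subst hd'
      have hm2 : PySem.Chars.isIn ['–'] (l ++ '–' :: r) = true :=
        (pvIsIn_singleton _ _).mpr (by simp)
      rw [if_pos (by simp [hm2]), if_neg (by simpa using hm), hsplit]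
      simp [hdig l hl hld, hdig r hr hrd, hl, hr]

theorem pvLoopA_eq_any (ps : List (List Char)) : pvLoopA ps = ps.any pvCheckA := by
  induction ps with
  | nil => rfl
  | cons p ps ih => by_cases h : pvCheckA p <;> simp [pvLoopA, h, ih]

theorem pvCheckA_eq_B (part : List Char) : pvCheckA part = pvCheckB part := by
  by_cases hb : pvCheckB part = true
  · rw [hb, (pvCheckA_iff part).mpr ((pvCheckB_iff part).mp hb)]
  · have ha : pvCheckA part ≠ true := fun h =>
      hb ((pvCheckB_iff part).mpr ((pvCheckA_iff part).mp h))
    simp only [Bool.not_eq_true] at ha hb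
    rw [ha, hb]

-- ===== VERDICT (by name: the statement is the Claim_ definition above) =====
theorem should_skip_line_with_number_pattern_spec : Claim_equal_should_skip_line_with_number_pattern := by
  intro line _
  unfold Spec_should_skip_line_with_number_pattern should_skip_line_with_number_pattern should_skip_line_with_number_pattern_alt
  rw [pvLoopA_eq_any]
  rw [show pvCheckA = pvCheckB from funext pvCheckA_eq_B]
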